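-- pv_equiv track=rewrite | github.com/vaibhav-jain-dev/learning-algo | problems/200-must-solve/graphs/08-minimum-passes/python_code.py | minimum_passes_with_copy
-- ===== SOURCE A (Python) =====
-- from typing import List
-- from collections import deque
--
-- def minimum_passes_with_copy(matrix: List[List[int]]) -> int:
--     """
--     Version that doesn't modify the input matrix.
--
--     Args:
--         matrix: 2D array of integers
--
--     Returns:
--         Minimum number of passes, or -1 if impossible
--     """
--     if not matrix or not matrix[0]:
--         return 0
--
--     rows, cols = len(matrix), len(matrix[0])
--     directions = [(-1, 0), (1, 0), (0, -1), (0, 1)]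
--
--     # Create a copy of the matrix
--     matrix_copy = [row[:] for row in matrix]
--
--     queue = deque()
--     negative_positions = set()
--
--     for row in range(rows):
--         for col in range(cols):
--             if matrix_copy[row][col] > 0:
--                 queue.append((row, col))
--             elif matrix_copy[row][col] < 0:
--                 negative_positions.add((row, col))
--
--     if not negative_positions:
--         return 0
--
--     passes = 0
--
--     while queue and negative_positions:
--         level_size = len(queue)
--         converted = []
--
--         for _ in range(level_size):
--             row, col = queue.popleft()
--
--             for dr, dc in directions:
--                 new_row, new_col = row + dr, col + dc
--
--                 if (new_row, new_col) in negative_positions: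
--                     negative_positions.remove((new_row, new_col))
--                     matrix_copy[new_row][new_col] = abs(matrix_copy[new_row][new_col])
--                     converted.append((new_row, new_col))
--
--         if converted:
--             passes += 1
--             for pos in converted:
--                 queue.append(pos)
--
--     return passes if not negative_positions else -1
-- ===== SOURCE B (Python) =====
-- from typing import List
--
-- def minimum_passes_with_copy(matrix: List[List[int]]) -> int:
--     """Synchronous whole-grid sweeps instead of a BFS queue: each pass flips every
--     negative cell that currently has a positive 4-neighbour, until a fixpoint."""
--     if not matrix or not matrix[0]:
--         return 0
--     rows, cols = len(matrix), len(matrix[0])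
--     grid = [row[:] for row in matrix]
--     passes = 0
--     while True:
--         converted = [(r, c) for r in range(rows) for c in range(cols)
--                      if grid[r][c] < 0 and any(
--                          0 <= nr < rows and 0 <= nc < cols and grid[nr][nc] > 0
--                          for nr, nc in ((r - 1, c), (r + 1, c), (r, c - 1), (r, c + 1)))]
--         if not converted:
--             break
--         for r, c in converted:
--             grid[r][c] = -grid[r][c]
--         passes += 1
--     if any(grid[r][c] < 0 for r in range(rows) for c in range(cols)):
--         return -1
--     return passes
-- ===== Notes on version B (the rewrite author's own statement) =====
-- stated objective: alternative
-- what changed: Replaces A's queue-driven multi-source BFS (deque of frontier cells, a negative-position set, per-level pops and a converted list re-enqueued) with a queueless synchronous fixpoint iteration: each pass rescans the whole grid, flips every negative cell that currently has a positive 4-neighbour, and repeats until a sweep converts nothing; the pass count (or -1 if a negative survives) is the answer.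
import Mathlib
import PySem

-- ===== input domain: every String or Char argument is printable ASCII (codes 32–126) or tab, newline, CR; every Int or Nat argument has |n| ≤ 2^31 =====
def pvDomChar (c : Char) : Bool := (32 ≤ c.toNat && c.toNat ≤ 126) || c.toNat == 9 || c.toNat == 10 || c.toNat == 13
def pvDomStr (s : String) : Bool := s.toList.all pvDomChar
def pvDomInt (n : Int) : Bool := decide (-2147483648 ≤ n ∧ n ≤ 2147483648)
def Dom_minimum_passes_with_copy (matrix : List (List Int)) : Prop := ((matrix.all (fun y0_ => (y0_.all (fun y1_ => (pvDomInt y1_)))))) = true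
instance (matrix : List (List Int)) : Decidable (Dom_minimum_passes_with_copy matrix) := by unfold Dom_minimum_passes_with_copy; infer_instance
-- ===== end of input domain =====

-- B is an alternative exact re-implementation: a queueless synchronous fixpoint iteration
-- (each pass rescans the whole grid and flips every negative cell that currently has a
-- positive 4-neighbour) instead of A's queue-driven multi-source BFS with a negative-position
-- set.  Return values are proved equal on Pre_ (inputs where neither Python raises).

-- Shared 2D grid access (Python matrix[r][c] / matrix[r][c] = v on nonnegative in-range
-- indices; exact there).
def pvGet2 (g : List (List Int)) (r c : Int) : Int :=
  PySem.List.pyGetD (PySem.List.pyGetD g r []) c 0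

def pvSet2 (g : List (List Int)) (r c : Int) (v : Int) : List (List Int) :=
  PySem.List.pySetD g r (PySem.List.pySetD (PySem.List.pyGetD g r []) c v)

-- ===== PORT A =====
-- directions = [(-1,0),(1,0),(0,-1),(0,1)]
def pvDirs : List (Int × Int) := [(-1, 0), (1, 0), (0, -1), (0, 1)]

-- one direction of A's inner loop; state = (negative_positions, matrix_copy, converted).
-- `.remove` is ported as Set.discard: it runs only under the membership guard, where both agree.
def pvAStepDir (r c : Int) (st : PySem.Set (Int × Int) × List (List Int) × List (Int × Int))
    (dir : Int × Int) : PySem.Set (Int × Int) × List (List Int) × List (Int × Int) :=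
  let nr := r + dir.1
  let nc := c + dir.2
  if PySem.Set.contains st.1 (nr, nc) then
    (PySem.Set.discard st.1 (nr, nc),
     pvSet2 st.2.1 nr nc (((pvGet2 st.2.1 nr nc).natAbs : Int)),
     st.2.2 ++ [(nr, nc)])
  else st

-- one level: pop every currently queued cell, collecting `converted`
def pvALevel (Q : List (Int × Int)) (negs : PySem.Set (Int × Int)) (copy : List (List Int)) :
    PySem.Set (Int × Int) × List (List Int) × List (Int × Int) :=
  Q.foldl (fun st cell => pvDirs.foldl (pvAStepDir cell.1 cell.2) st) (negs, copy, [])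

-- termination helper for pvALoop (cited by decreasing_by only)
lemma pvAStepDir_len (r c : Int) (st : PySem.Set (Int × Int) × List (List Int) × List (Int × Int))
    (dir : Int × Int) :
    (pvAStepDir r c st dir).1.length + (pvAStepDir r c st dir).2.2.length ≤
      st.1.length + st.2.2.length := by
  by_cases hm : (r + dir.1, c + dir.2) ∈ st.1
  · have hlt : (PySem.Set.discard st.1 (r + dir.1, c + dir.2)).length < st.1.length := by
      unfold PySem.Set.discard
      refine List.length_filter_lt_length_iff_exists.2 ⟨_, hm, by simp⟩
    simp only [pvAStepDir, hm, PySem.Set.contains_eq_listContains, List.contains_iff_mem,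
      decide_true, if_true, List.length_append, List.length_cons, List.length_nil]
    omega
  · simp [pvAStepDir, hm, PySem.Set.contains_eq_listContains, List.contains_iff_mem]

lemma pvAFold_len (r c : Int) :
    ∀ (ds : List (Int × Int)) (st : PySem.Set (Int × Int) × List (List Int) × List (Int × Int)),
      (ds.foldl (pvAStepDir r c) st).1.length + (ds.foldl (pvAStepDir r c) st).2.2.length ≤
        st.1.length + st.2.2.length := by
  intro ds
  induction ds with
  | nil => intro st; simp
  | cons d ds ih =>
      intro st
      simp only [List.foldl_cons]
      exact le_trans (ih _) (pvAStepDir_len r c st d)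

lemma pvALevel_len (Q : List (Int × Int)) (negs : PySem.Set (Int × Int)) (copy : List (List Int)) :
    (pvALevel Q negs copy).1.length + (pvALevel Q negs copy).2.2.length ≤ negs.length := by
  unfold pvALevel
  have h : ∀ (Q : List (Int × Int)) (st : PySem.Set (Int × Int) × List (List Int) × List (Int × Int)),
      ((Q.foldl (fun st cell => pvDirs.foldl (pvAStepDir cell.1 cell.2) st) st).1.length +
        (Q.foldl (fun st cell => pvDirs.foldl (pvAStepDir cell.1 cell.2) st) st).2.2.length ≤
        st.1.length + st.2.2.length) := by
    intro Q
    induction Q with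
    | nil => intro st; simp
    | cons q Q ih =>
        intro st
        simp only [List.foldl_cons]
        exact le_trans (ih _) (pvAFold_len q.1 q.2 pvDirs st)
  simpa using h Q (negs, copy, [])

lemma pvALoop_dec (Q : List (Int × Int)) (negs : PySem.Set (Int × Int)) (copy : List (List Int))
    (h : ¬ (pvALevel Q negs copy).2.2 = []) : (pvALevel Q negs copy).1.length < negs.length := by
  have h1 := pvALevel_len Q negs copy
  have h2 : 0 < (pvALevel Q negs copy).2.2.length := List.length_pos_of_ne_nil h
  omega

-- the `while queue and negative_positions` loop; returns (negative_positions, passes)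
def pvALoop (Q : List (Int × Int)) (negs : PySem.Set (Int × Int)) (copy : List (List Int))
    (passes : Int) : PySem.Set (Int × Int) × Int :=
  if Q = [] ∨ negs = [] then (negs, passes)
  else
    let st := pvALevel Q negs copy
    if st.2.2 = [] then (st.1, passes)
    else pvALoop st.2.2 st.1 st.2.1 (passes + 1)
termination_by negs.length
decreasing_by exact pvALoop_dec Q negs copy (by assumption)

-- initial scan: queue of positive cells (row-major), set of negative cells
def pvAInit (matrix : List (List Int)) (rows cols : Nat) :
    List (Int × Int) × PySem.Set (Int × Int) :=
  (List.range rows).foldl (fun st (r : Nat) =>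
    (List.range cols).foldl (fun st (c : Nat) =>
      if 0 < pvGet2 matrix (r : Int) (c : Int) then (st.1 ++ [((r : Int), (c : Int))], st.2)
      else if pvGet2 matrix (r : Int) (c : Int) < 0 then
        (st.1, PySem.Set.add st.2 ((r : Int), (c : Int)))
      else st) st) ([], PySem.Set.empty)

-- matrix_copy = [row[:] for row in matrix] is value-equal to matrix, so the copy is matrix itself
def minimum_passes_with_copy (matrix : List (List Int)) : Int :=
  if matrix = [] ∨ matrix.headD [] = [] then 0
  else
    let rows := matrix.length
    let cols := (matrix.headD []).length
    let init := pvAInit matrix rows cols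
    if init.2 = [] then 0
    else
      let res := pvALoop init.1 init.2 matrix 0
      if res.1 = [] then res.2 else -1

-- ===== PORT B =====
-- the 4-neighbour tuple ((r-1,c),(r+1,c),(r,c-1),(r,c+1))
def pvBDirs (r c : Int) : List (Int × Int) := [(r - 1, c), (r + 1, c), (r, c - 1), (r, c + 1)]

-- `0 <= nr < rows and 0 <= nc < cols and grid[nr][nc] > 0`
def pvInb (rows cols : Nat) (g : List (List Int)) (p : Int × Int) : Bool :=
  decide (0 ≤ p.1 ∧ p.1 < (rows : Int) ∧ 0 ≤ p.2 ∧ p.2 < (cols : Int) ∧ 0 < pvGet2 g p.1 p.2)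

-- the `converted` list comprehension of one sweep (row-major)
def pvConvList (rows cols : Nat) (g : List (List Int)) : List (Int × Int) :=
  (List.range rows).flatMap (fun (r : Nat) =>
    (List.range cols).filterMap (fun (c : Nat) =>
      if pvGet2 g (r : Int) (c : Int) < 0 ∧ (pvBDirs (r : Int) (c : Int)).any (pvInb rows cols g)
      then some ((r : Int), (c : Int)) else none))

-- `for r, c in converted: grid[r][c] = -grid[r][c]`
def pvFlip (g : List (List Int)) (conv : List (Int × Int)) : List (List Int) :=
  conv.foldl (fun g p => pvSet2 g p.1 p.2 (-(pvGet2 g p.1 p.2))) g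

-- termination measure for pvBSweep (proof-side only)
def pvNegCells (rows cols : Int) (g : List (List Int)) : Nat :=
  ∑ i ∈ Finset.range rows.toNat, ∑ j ∈ Finset.range cols.toNat,
    (if pvGet2 g (i : Int) (j : Int) < 0 then 1 else 0)

lemma pvGet2_lt_zero_bounds {g : List (List Int)} {r c : Int} (h0 : 0 ≤ r) (h2 : 0 ≤ c)
    (hv : pvGet2 g r c < 0) :
    r.toNat < g.length ∧ c.toNat < (g.getD r.toNat []).length := by
  unfold pvGet2 at hv
  rw [PySem.List.pyGetD_of_nonneg _ _ h0, PySem.List.pyGetD_of_nonneg _ _ h2] at hv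
  by_cases hr : r.toNat < g.length
  · refine ⟨hr, ?_⟩
    by_cases hc : c.toNat < (g.getD r.toNat []).length
    · exact hc
    · rw [List.getD_eq_default _ _ (by omega)] at hv; omega
  · rw [List.getD_eq_default _ [] (by omega)] at hv
    simp only [List.getD_nil] at hv; omega

lemma pvGet2_pvSet2 {g : List (List Int)} {r c : Int} (w : Int) (hr0 : 0 ≤ r) (hc0 : 0 ≤ c)
    (hr : r.toNat < g.length) (hc : c.toNat < (g.getD r.toNat []).length)
    {x y : Int} (hx : 0 ≤ x) (hy : 0 ≤ y) :
    pvGet2 (pvSet2 g r c w) x y = if x = r ∧ y = c then w else pvGet2 g x y := by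
  unfold pvGet2 pvSet2
  rw [PySem.List.pySetD_of_nonneg _ _ hr0, PySem.List.pySetD_of_nonneg _ _ hc0,
      PySem.List.pyGetD_of_nonneg _ _ hr0,
      PySem.List.pyGetD_of_nonneg _ _ hx, PySem.List.pyGetD_of_nonneg _ _ hx,
      PySem.List.pyGetD_of_nonneg _ _ hy, PySem.List.pyGetD_of_nonneg _ _ hy]
  set row := g.getD r.toNat [] with hrow
  by_cases hxr : x = r
  · subst hxr
    have houter : (g.set x.toNat (row.set c.toNat w)).getD x.toNat [] = row.set c.toNat w := by
      rw [List.getD_eq_getElem _ _ (by simpa using hr), List.getElem_set_self (by simpa using hr)]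
    rw [houter]
    by_cases hyc : y = c
    · subst hyc
      simp only [and_self, if_true]
      rw [List.getD_eq_getElem _ _ (by simpa using hc), List.getElem_set_self (by simpa using hc)]
    · have hne : y.toNat ≠ c.toNat := by omega
      simp only [hyc, and_false, if_false]
      unfold List.getD
      rw [List.getElem?_set_ne (by omega)]
      rfl
  · have hne : x.toNat ≠ r.toNat := by omega
    simp only [hxr, false_and, if_false]
    have houter : (g.set r.toNat (row.set c.toNat w)).getD x.toNat [] = g.getD x.toNat [] := by
      unfold List.getD
      rw [List.getElem?_set_ne (by omega)]
    rw [houter]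

lemma pvNegCells_flip {g : List (List Int)} {rows cols r c : Int} (h0 : 0 ≤ r) (h1 : r < rows)
    (h2 : 0 ≤ c) (h3 : c < cols) (hv : pvGet2 g r c < 0) {w : Int} (hw : 0 ≤ w) :
    pvNegCells rows cols (pvSet2 g r c w) + 1 = pvNegCells rows cols g := by
  obtain ⟨hr, hc⟩ := pvGet2_lt_zero_bounds h0 h2 hv
  have hget : ∀ x y : Int, 0 ≤ x → 0 ≤ y →
      pvGet2 (pvSet2 g r c w) x y = if x = r ∧ y = c then w else pvGet2 g x y :=
    fun x y hx hy => pvGet2_pvSet2 w h0 h2 hr hc hx hy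
  have hrmem : r.toNat ∈ Finset.range rows.toNat := by
    simp only [Finset.mem_range]; omega
  have hcmem : c.toNat ∈ Finset.range cols.toNat := by
    simp only [Finset.mem_range]; omega
  unfold pvNegCells
  rw [← Finset.sum_erase_add _ (fun (i : Nat) => ∑ j ∈ Finset.range cols.toNat,
        (if pvGet2 (pvSet2 g r c w) (i : Int) (j : Int) < 0 then 1 else 0)) hrmem,
      ← Finset.sum_erase_add _ (fun (i : Nat) => ∑ j ∈ Finset.range cols.toNat,
        (if pvGet2 g (i : Int) (j : Int) < 0 then 1 else 0)) hrmem]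
  have houter : ∑ i ∈ (Finset.range rows.toNat).erase r.toNat,
      ∑ j ∈ Finset.range cols.toNat, (if pvGet2 (pvSet2 g r c w) (i : Int) (j : Int) < 0 then 1 else 0) =
      ∑ i ∈ (Finset.range rows.toNat).erase r.toNat,
      ∑ j ∈ Finset.range cols.toNat, (if pvGet2 g (i : Int) (j : Int) < 0 then 1 else 0) := by
    refine Finset.sum_congr rfl fun i hi => Finset.sum_congr rfl fun j hj => ?_
    have hir : (i : Int) ≠ r := by
      have := Finset.ne_of_mem_erase hi; omega
    rw [hget i j (by positivity) (by positivity)]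
    simp [hir]
  rw [houter]
  have hinner : (∑ j ∈ Finset.range cols.toNat,
      (if pvGet2 (pvSet2 g r c w) ((r.toNat : Nat) : Int) (j : Int) < 0 then 1 else 0)) + 1 =
      ∑ j ∈ Finset.range cols.toNat,
      (if pvGet2 g ((r.toNat : Nat) : Int) (j : Int) < 0 then 1 else 0) := by
    rw [← Finset.sum_erase_add _ (fun (j : Nat) =>
        (if pvGet2 (pvSet2 g r c w) ((r.toNat : Nat) : Int) (j : Int) < 0 then 1 else 0)) hcmem,
        ← Finset.sum_erase_add _ (fun (j : Nat) =>
        (if pvGet2 g ((r.toNat : Nat) : Int) (j : Int) < 0 then 1 else 0)) hcmem]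
    have hrr : ((r.toNat : Nat) : Int) = r := by omega
    have hj1 : ∑ j ∈ (Finset.range cols.toNat).erase c.toNat,
        (if pvGet2 (pvSet2 g r c w) ((r.toNat : Nat) : Int) (j : Int) < 0 then 1 else 0) =
        ∑ j ∈ (Finset.range cols.toNat).erase c.toNat,
        (if pvGet2 g ((r.toNat : Nat) : Int) (j : Int) < 0 then 1 else 0) := by
      refine Finset.sum_congr rfl fun j hj => ?_
      have hjc : (j : Int) ≠ c := by
        have := Finset.ne_of_mem_erase hj; omega
      rw [hget _ j (by positivity) (by positivity)]
      simp [hjc]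
    rw [hj1, hget _ _ (by positivity) (by positivity)]
    have hcc : ((c.toNat : Nat) : Int) = c := by omega
    simp only [hrr, hcc, and_self, if_true]
    have hw' : ¬ (w < 0) := by omega
    simp only [hw', if_false, hv, if_pos]
  omega

-- membership in one sweep's converted list (cited by the termination proof)
lemma pvConvList_mem (rows cols : Nat) (g : List (List Int)) (x : Int × Int) :
    x ∈ pvConvList rows cols g ↔ ∃ r ∈ List.range rows, ∃ c ∈ List.range cols,
      x = ((r : Int), (c : Int)) ∧ pvGet2 g (r : Int) (c : Int) < 0 ∧
        (pvBDirs (r : Int) (c : Int)).any (pvInb rows cols g) = true := by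
  rw [pvConvList, List.mem_flatMap]
  constructor
  · rintro ⟨r, hr, hx⟩
    rcases List.mem_filterMap.mp hx with ⟨c, hc, hfc⟩
    rw [Option.ite_some_none_eq_some] at hfc
    exact ⟨r, hr, c, hc, hfc.2.symm, hfc.1.1, hfc.1.2⟩
  · rintro ⟨r, hr, c, hc, hx, hneg, hany⟩
    refine ⟨r, hr, List.mem_filterMap.mpr ⟨c, hc, ?_⟩⟩
    rw [Option.ite_some_none_eq_some]
    exact ⟨⟨hneg, hany⟩, hx.symm⟩

lemma pvConvList_inbneg (rows cols : Nat) (g : List (List Int)) {x : Int × Int}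
    (hx : x ∈ pvConvList rows cols g) :
    0 ≤ x.1 ∧ x.1 < (rows : Int) ∧ 0 ≤ x.2 ∧ x.2 < (cols : Int) ∧ pvGet2 g x.1 x.2 < 0 := by
  rcases (pvConvList_mem rows cols g x).mp hx with ⟨r, hr, c, hc, hx', hneg, -⟩
  subst hx'
  rw [List.mem_range] at hr hc
  exact ⟨by positivity, by omega, by positivity, by omega, hneg⟩

lemma pvNodupFlatMapFst {l : List Nat} (f : Nat → List (Int × Int))
    (h1 : ∀ r, (f r).Nodup) (h2 : ∀ r x, x ∈ f r → x.1 = (r : Int)) (hl : l.Nodup) :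
    (l.flatMap f).Nodup := by
  induction l with
  | nil => simp
  | cons a l ih =>
      rw [List.flatMap_cons]
      rcases List.nodup_cons.mp hl with ⟨ha, hl'⟩
      refine List.Nodup.append (h1 a) (ih hl') ?_
      intro x hxa hxl
      rcases List.mem_flatMap.mp hxl with ⟨b, hb, hxb⟩
      have e1 := h2 a x hxa
      have e2 := h2 b x hxb
      have : a = b := by omega
      exact ha (this ▸ hb)

lemma pvConvList_nodup (rows cols : Nat) (g : List (List Int)) :
    (pvConvList rows cols g).Nodup := by
  rw [pvConvList]
  refine pvNodupFlatMapFst _ (fun r => ?_) (fun r x hx => ?_) (List.nodup_range)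
  · refine List.Nodup.filterMap ?_ List.nodup_range
    intro a b x hxa hxb
    simp only [Option.mem_def, Option.ite_some_none_eq_some] at hxa hxb
    have ha := congrArg Prod.snd hxa.2
    have hb := congrArg Prod.snd hxb.2
    simp only at ha hb
    omega
  · rcases List.mem_filterMap.mp hx with ⟨c, hc, hfc⟩
    simp only [Option.ite_some_none_eq_some] at hfc
    rw [← hfc.2]

lemma pvFlip_count (rows cols : Int) :
    ∀ (conv : List (Int × Int)) (g : List (List Int)), conv.Nodup →
      (∀ p ∈ conv, 0 ≤ p.1 ∧ p.1 < rows ∧ 0 ≤ p.2 ∧ p.2 < cols ∧ pvGet2 g p.1 p.2 < 0) →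
      pvNegCells rows cols (pvFlip g conv) + conv.length = pvNegCells rows cols g := by
  intro conv
  induction conv with
  | nil => intro g _ _; simp [pvFlip]
  | cons p conv ih =>
      intro g hnd hmem
      rcases List.nodup_cons.mp hnd with ⟨hp, hnd'⟩
      obtain ⟨h0, h1, h2, h3, hv⟩ := hmem p (List.mem_cons_self ..)
      obtain ⟨hr, hc⟩ := pvGet2_lt_zero_bounds h0 h2 hv
      set g1 := pvSet2 g p.1 p.2 (-(pvGet2 g p.1 p.2)) with hg1
      have hflip1 : pvNegCells rows cols g1 + 1 = pvNegCells rows cols g :=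
        pvNegCells_flip h0 h1 h2 h3 hv (by omega)
      have hmem' : ∀ q ∈ conv, 0 ≤ q.1 ∧ q.1 < rows ∧ 0 ≤ q.2 ∧ q.2 < cols ∧
          pvGet2 g1 q.1 q.2 < 0 := by
        intro q hq
        obtain ⟨k0, k1, k2, k3, kv⟩ := hmem q (List.mem_cons_of_mem _ hq)
        have hne : ¬ (q.1 = p.1 ∧ q.2 = p.2) := by
          intro he
          exact hp (by rw [← Prod.ext_iff.mpr he] at *; exact hq)
        rw [hg1, pvGet2_pvSet2 _ h0 h2 hr hc k0 k2, if_neg hne] at *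
        exact ⟨k0, k1, k2, k3, kv⟩
      have : pvFlip g (p :: conv) = pvFlip g1 conv := by
        simp [pvFlip, hg1]
      rw [this]
      have := ih g1 hnd' hmem'
      simp only [List.length_cons]
      omega

lemma pvSweep_dec (rows cols : Nat) (g : List (List Int))
    (h : ¬ pvConvList rows cols g = []) :
    pvNegCells (rows : Int) (cols : Int) (pvFlip g (pvConvList rows cols g)) <
      pvNegCells (rows : Int) (cols : Int) g := by
  have hcnt := pvFlip_count (rows : Int) (cols : Int) (pvConvList rows cols g) g
    (pvConvList_nodup rows cols g) (fun p hp => pvConvList_inbneg rows cols g hp)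
  have hlen : 0 < (pvConvList rows cols g).length := List.length_pos_of_ne_nil h
  omega

-- the sweep loop: repeat until a sweep converts nothing; returns (grid, passes)
def pvBSweep (rows cols : Nat) (g : List (List Int)) (passes : Int) :
    List (List Int) × Int :=
  if h : pvConvList rows cols g = [] then (g, passes)
  else pvBSweep rows cols (pvFlip g (pvConvList rows cols g)) (passes + 1)
termination_by pvNegCells (rows : Int) (cols : Int) g
decreasing_by exact pvSweep_dec rows cols g h

-- grid = [row[:] for row in matrix] is value-equal to matrix, so the copy is matrix itself
def minimum_passes_with_copy_alt (matrix : List (List Int)) : Int :=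
  if matrix = [] ∨ matrix.headD [] = [] then 0
  else
    let rows := matrix.length
    let cols := (matrix.headD []).length
    let res := pvBSweep rows cols matrix 0
    if (List.range rows).any (fun (r : Nat) =>
        (List.range cols).any (fun (c : Nat) => decide (pvGet2 res.1 (r : Int) (c : Int) < 0)))
    then -1 else res.2

-- ===== PRECONDITION & SPEC =====
-- Pre_ excludes exactly the ragged inputs whose first row is longer than some later row:
-- there both Pythons raise IndexError while scanning grid[r][c] for c in range(cols).
def Pre_minimum_passes_with_copy (matrix : List (List Int)) : Prop :=
  ∀ row ∈ matrix, (matrix.headD []).length ≤ row.length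
instance (matrix : List (List Int)) : Decidable (Pre_minimum_passes_with_copy matrix) := by
  unfold Pre_minimum_passes_with_copy; infer_instance
def pvWitness_minimum_passes_with_copy : List (List Int) := [[1, -1], [0, -2]]

def Spec_minimum_passes_with_copy (matrix : List (List Int)) (out : Int) : Prop :=
  out = minimum_passes_with_copy_alt matrix
instance (matrix : List (List Int)) (out : Int) : Decidable (Spec_minimum_passes_with_copy matrix out) := by
  unfold Spec_minimum_passes_with_copy; infer_instance

-- ===== CLAIM (what is proved, stated in full; the proofs are below) =====
def Claim_equal_minimum_passes_with_copy : Prop := ∀ (matrix : List (List Int)), Dom_minimum_passes_with_copy matrix → Pre_minimum_passes_with_copy matrix → Spec_minimum_passes_with_copy matrix (minimum_passes_with_copy matrix)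

-- ===== LEMMAS AND PROOFS =====

-- x is a 4-neighbour of q
def pvAdj (q x : Int × Int) : Prop := ∃ d ∈ pvDirs, x = (q.1 + d.1, q.2 + d.2)

lemma mem_pvBDirs_iff (x p : Int × Int) : p ∈ pvBDirs x.1 x.2 ↔ pvAdj p x := by
  simp only [pvBDirs, pvAdj, pvDirs, List.mem_cons, List.not_mem_nil, or_false,
    Prod.ext_iff, Prod.exists]
  constructor
  · rintro (⟨h1, h2⟩ | ⟨h1, h2⟩ | ⟨h1, h2⟩ | ⟨h1, h2⟩)
    exacts [⟨1, 0, by omega, by omega, by omega⟩, ⟨-1, 0, by omega, by omega, by omega⟩,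
      ⟨0, 1, by omega, by omega, by omega⟩, ⟨0, -1, by omega, by omega, by omega⟩]
  · rintro ⟨a, b, (⟨e1, e2⟩ | ⟨e1, e2⟩ | ⟨e1, e2⟩ | ⟨e1, e2⟩), f1, f2⟩ <;> omega

-- the running invariant: the negative-position set holds exactly the in-bounds cells of the
-- current grid that are still negative
def pvInv (rows cols : Int) (negs : PySem.Set (Int × Int)) (g : List (List Int)) : Prop :=
  ∀ r c : Int, ((r, c) ∈ negs ↔ 0 ≤ r ∧ r < rows ∧ 0 ≤ c ∧ c < cols ∧ pvGet2 g r c < 0)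

-- the correspondence invariant between A's (queue, set) state and B's grid
def pvRel (rows cols : Nat) (Q : List (Int × Int)) (negs : PySem.Set (Int × Int))
    (g : List (List Int)) : Prop :=
  pvInv (rows : Int) (cols : Int) negs g ∧ negs.Nodup ∧
  (∀ q ∈ Q, 0 ≤ q.1 ∧ q.1 < (rows : Int) ∧ 0 ≤ q.2 ∧ q.2 < (cols : Int) ∧ 0 < pvGet2 g q.1 q.2) ∧
  (∀ x ∈ negs, (∃ y : Int × Int, (0 ≤ y.1 ∧ y.1 < (rows : Int) ∧ 0 ≤ y.2 ∧ y.2 < (cols : Int) ∧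
      0 < pvGet2 g y.1 y.2) ∧ pvAdj y x) → ∃ q ∈ Q, pvAdj q x)

-- characterisation of A's four-direction fold for one queue cell
lemma pvDirChar (r c : Int) :
    ∀ (ds : List (Int × Int)) (negs : PySem.Set (Int × Int)) (g : List (List Int))
      (conv : List (Int × Int)),
      negs.Nodup → conv.Nodup → (∀ x ∈ conv, x ∉ negs) →
      ((∀ x, x ∈ (ds.foldl (pvAStepDir r c) (negs, g, conv)).1 ↔
          x ∈ negs ∧ ∀ d ∈ ds, x ≠ (r + d.1, c + d.2)) ∧
       (∀ x, x ∈ (ds.foldl (pvAStepDir r c) (negs, g, conv)).2.2 ↔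
          x ∈ conv ∨ (x ∈ negs ∧ ∃ d ∈ ds, x = (r + d.1, c + d.2))) ∧
       (ds.foldl (pvAStepDir r c) (negs, g, conv)).1.Nodup ∧
       (ds.foldl (pvAStepDir r c) (negs, g, conv)).2.2.Nodup ∧
       (∀ x ∈ (ds.foldl (pvAStepDir r c) (negs, g, conv)).2.2,
          x ∉ (ds.foldl (pvAStepDir r c) (negs, g, conv)).1)) := by
  intro ds
  induction ds with
  | nil =>
      intro negs g conv hN hC hCN
      refine ⟨fun x => by simp, fun x => by simp, hN, hC, fun x hx => hCN x hx⟩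
  | cons d ds ih =>
      intro negs g conv hN hC hCN
      by_cases hm : (r + d.1, c + d.2) ∈ negs
      · have hstep : pvAStepDir r c (negs, g, conv) d =
            (PySem.Set.discard negs (r + d.1, c + d.2),
             pvSet2 g (r + d.1) (c + d.2) (((pvGet2 g (r + d.1) (c + d.2)).natAbs : Int)),
             conv ++ [(r + d.1, c + d.2)]) := by
          simp only [pvAStepDir, hm, PySem.Set.contains_eq_listContains, List.contains_iff_mem,
            decide_true, if_true]
        have hC' : (conv ++ [(r + d.1, c + d.2)]).Nodup := by
          refine List.Nodup.append hC (by simp) ?_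
          intro x hx1 hx2
          simp only [List.mem_singleton] at hx2
          exact hCN x hx1 (hx2 ▸ hm)
        have hCN' : ∀ x ∈ conv ++ [(r + d.1, c + d.2)],
            x ∉ PySem.Set.discard negs (r + d.1, c + d.2) := by
          intro x hx
          rw [PySem.Set.mem_discard]
          rcases List.mem_append.mp hx with hx | hx
          · exact fun h => hCN x hx h.1
          · simp only [List.mem_singleton] at hx
            exact fun h => h.2 hx
        obtain ⟨ih1, ih2, ih3, ih4, ih5⟩ := ih (PySem.Set.discard negs (r + d.1, c + d.2)) _ _
          (PySem.Set.nodup_discard _ _ hN) hC' hCN'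
        simp only [List.foldl_cons, hstep]
        refine ⟨fun x => ?_, fun x => ?_, ih3, ih4, ih5⟩
        · rw [ih1 x, PySem.Set.mem_discard]
          simp only [List.forall_mem_cons]
          tauto
        · rw [ih2 x]
          simp only [List.mem_append, List.mem_singleton, PySem.Set.mem_discard,
            List.exists_mem_cons_iff]
          by_cases hx : x = (r + d.1, c + d.2) <;> subst_eqs <;> tauto
      · have hstep : pvAStepDir r c (negs, g, conv) d = (negs, g, conv) := by
          simp [pvAStepDir, hm, PySem.Set.contains_eq_listContains, List.contains_iff_mem]
        obtain ⟨ih1, ih2, ih3, ih4, ih5⟩ := ih negs g conv hN hC hCN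
        simp only [List.foldl_cons, hstep]
        refine ⟨fun x => ?_, fun x => ?_, ih3, ih4, ih5⟩
        · rw [ih1 x]
          simp only [List.forall_mem_cons]
          constructor
          · rintro ⟨h1, h2⟩
            exact ⟨h1, ⟨fun he => hm (he ▸ h1), h2⟩⟩
          · tauto
        · rw [ih2 x]
          simp only [List.exists_mem_cons_iff]
          constructor
          · tauto
          · rintro (h | ⟨h1, (h2 | h2)⟩)
            · exact Or.inl h
            · exact absurd (h2 ▸ h1) hm
            · exact Or.inr ⟨h1, h2⟩

-- characterisation of one whole level of A's BFS
lemma pvLevelChar :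
    ∀ (Q : List (Int × Int)) (negs : PySem.Set (Int × Int)) (g : List (List Int))
      (conv : List (Int × Int)),
      negs.Nodup → conv.Nodup → (∀ x ∈ conv, x ∉ negs) →
      (let st := Q.foldl (fun st cell => pvDirs.foldl (pvAStepDir cell.1 cell.2) st) (negs, g, conv)
       (∀ x, x ∈ st.1 ↔ x ∈ negs ∧ ∀ q ∈ Q, ¬ pvAdj q x) ∧
       (∀ x, x ∈ st.2.2 ↔ x ∈ conv ∨ (x ∈ negs ∧ ∃ q ∈ Q, pvAdj q x)) ∧
       st.1.Nodup ∧ st.2.2.Nodup ∧ (∀ x ∈ st.2.2, x ∉ st.1)) := by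
  intro Q
  induction Q with
  | nil =>
      intro negs g conv hN hC hCN
      exact ⟨fun x => by simp, fun x => by simp, hN, hC, hCN⟩
  | cons q Q ih =>
      intro negs g conv hN hC hCN
      obtain ⟨d1, d2, d3, d4, d5⟩ := pvDirChar q.1 q.2 pvDirs negs g conv hN hC hCN
      set st1 := pvDirs.foldl (pvAStepDir q.1 q.2) (negs, g, conv) with hst1
      obtain ⟨i1, i2, i3, i4, i5⟩ := ih st1.1 st1.2.1 st1.2.2 d3 d4 d5
      have hunf : (q :: Q).foldl (fun st cell => pvDirs.foldl (pvAStepDir cell.1 cell.2) st)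
          (negs, g, conv) =
          Q.foldl (fun st cell => pvDirs.foldl (pvAStepDir cell.1 cell.2) st)
            (st1.1, st1.2.1, st1.2.2) := by
        simp only [List.foldl_cons, hst1]
      simp only [hunf]
      have hadj : ∀ x, pvAdj q x ↔ ∃ d ∈ pvDirs, x = (q.1 + d.1, q.2 + d.2) := fun x => Iff.rfl
      refine ⟨fun x => ?_, fun x => ?_, i3, i4, i5⟩
      · rw [i1 x, d1 x]
        simp only [List.forall_mem_cons, hadj, pvAdj]
        constructor
        · rintro ⟨⟨h1, h2⟩, h3⟩
          exact ⟨h1, fun he => by rcases he with ⟨d, hd, he⟩; exact h2 d hd he, h3⟩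
        · rintro ⟨h1, h2, h3⟩
          exact ⟨⟨h1, fun d hd he => h2 ⟨d, hd, he⟩⟩, h3⟩
      · rw [i2 x, d2 x, d1 x]
        simp only [List.exists_mem_cons_iff, pvAdj]
        constructor
        · rintro ((h | ⟨h1, h2⟩) | ⟨⟨h1, -⟩, h3⟩)
          · exact Or.inl h
          · exact Or.inr ⟨h1, Or.inl h2⟩
          · exact Or.inr ⟨h1, Or.inr h3⟩
        · rintro (h | ⟨h1, (h2 | h3)⟩)
          · exact Or.inl (Or.inl h)
          · exact Or.inl (Or.inr ⟨h1, h2⟩)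
          · by_cases hex : ∃ d ∈ pvDirs, x = (q.1 + d.1, q.2 + d.2)
            · exact Or.inl (Or.inr ⟨h1, hex⟩)
            · exact Or.inr ⟨⟨h1, fun d hd he => hex ⟨d, hd, he⟩⟩, h3⟩

-- a scan over the ranges finds a negative cell iff the invariant set is nonempty
lemma pvScan_iff (rows cols : Nat) (negs : PySem.Set (Int × Int)) (g : List (List Int))
    (hInv : pvInv (rows : Int) (cols : Int) negs g) :
    ((List.range rows).any (fun r =>
        (List.range cols).any (fun c => decide (pvGet2 g (r : Int) (c : Int) < 0))) = true) ↔
      negs ≠ [] := by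
  constructor
  · intro h
    rw [List.any_eq_true] at h
    obtain ⟨i, hi, h⟩ := h
    rw [List.any_eq_true] at h
    obtain ⟨j, hj, h⟩ := h
    rw [List.mem_range] at hi hj
    rw [decide_eq_true_iff] at h
    intro hnil
    have : ((i : Int), (j : Int)) ∈ negs := (hInv _ _).mpr
      ⟨by positivity, by omega, by positivity, by omega, h⟩
    rw [hnil] at this
    simp at this
  · intro h
    obtain ⟨x, hx⟩ := List.exists_mem_of_ne_nil _ h
    obtain ⟨h0, h1, h2, h3, hv⟩ := (hInv x.1 x.2).mp (by simpa using hx)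
    rw [List.any_eq_true]
    refine ⟨x.1.toNat, by rw [List.mem_range]; omega, ?_⟩
    rw [List.any_eq_true]
    refine ⟨x.2.toNat, by rw [List.mem_range]; omega, ?_⟩
    rw [decide_eq_true_iff]
    have e1 : ((x.1.toNat : Nat) : Int) = x.1 := by omega
    have e2 : ((x.2.toNat : Nat) : Int) = x.2 := by omega
    rw [e1, e2]; exact hv

-- initial scan: set and queue projections of A's fold, and their characterisations
def pvQStep (matrix : List (List Int)) (r : Nat) (q : List (Int × Int)) (c : Nat) :
    List (Int × Int) :=
  if 0 < pvGet2 matrix (r : Int) (c : Int) then q ++ [((r : Int), (c : Int))] else q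

def pvSStep (matrix : List (List Int)) (r : Nat) (s : PySem.Set (Int × Int)) (c : Nat) :
    PySem.Set (Int × Int) :=
  if 0 < pvGet2 matrix (r : Int) (c : Int) then s
  else if pvGet2 matrix (r : Int) (c : Int) < 0 then PySem.Set.add s ((r : Int), (c : Int))
  else s

lemma pvFoldPair {α β γ : Type} (f : α × β → γ → α × β) (f1 : α → γ → α) (f2 : β → γ → β)
    (h : ∀ st x, f st x = (f1 st.1 x, f2 st.2 x)) :
    ∀ (l : List γ) (st : α × β), l.foldl f st = (l.foldl f1 st.1, l.foldl f2 st.2) := by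
  intro l
  induction l with
  | nil => intro st; simp
  | cons x l ih =>
      intro st
      simp only [List.foldl_cons, h st x]
      rw [ih]

lemma pvAInit_proj (matrix : List (List Int)) (rows cols : Nat) :
    pvAInit matrix rows cols =
      ((List.range rows).foldl (fun q r => (List.range cols).foldl (pvQStep matrix r) q) [],
       (List.range rows).foldl (fun s r => (List.range cols).foldl (pvSStep matrix r) s)
         PySem.Set.empty) := by
  unfold pvAInit
  rw [pvFoldPair _ (fun q r => (List.range cols).foldl (pvQStep matrix r) q)
    (fun s r => (List.range cols).foldl (pvSStep matrix r) s) ?_]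
  intro st r
  rw [pvFoldPair _ (pvQStep matrix r) (pvSStep matrix r) ?_]
  intro st c
  unfold pvQStep pvSStep
  by_cases h1 : 0 < pvGet2 matrix (r : Int) (c : Int)
  · simp [h1]
  · by_cases h2 : pvGet2 matrix (r : Int) (c : Int) < 0
    · simp [h1, h2]
    · simp [h1, h2]

lemma pvSFold_inner (matrix : List (List Int)) (r : Nat) :
    ∀ (l : List Nat) (s : PySem.Set (Int × Int)),
      (s.Nodup → (l.foldl (pvSStep matrix r) s).Nodup) ∧
      ∀ x : Int × Int, x ∈ l.foldl (pvSStep matrix r) s ↔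
        x ∈ s ∨ ∃ c ∈ l, x = ((r : Int), (c : Int)) ∧ pvGet2 matrix (r : Int) (c : Int) < 0 := by
  intro l
  induction l with
  | nil => intro s; simp
  | cons c l ih =>
      intro s
      simp only [List.foldl_cons]
      by_cases h1 : 0 < pvGet2 matrix (r : Int) (c : Int)
      · rw [show pvSStep matrix r s c = s by simp [pvSStep, h1]]
        refine ⟨(ih s).1, fun x => ?_⟩
        rw [(ih s).2 x]
        constructor
        · rintro (hs | ⟨c', hc', e, hv⟩)
          · exact Or.inl hs
          · exact Or.inr ⟨c', List.mem_cons_of_mem _ hc', e, hv⟩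
        · rintro (hs | ⟨c', hc', e, hv⟩)
          · exact Or.inl hs
          · rcases List.mem_cons.mp hc' with h | h
            · subst h; omega
            · exact Or.inr ⟨c', h, e, hv⟩
      · by_cases h2 : pvGet2 matrix (r : Int) (c : Int) < 0
        · rw [show pvSStep matrix r s c = PySem.Set.add s ((r : Int), (c : Int)) by
            simp [pvSStep, h1, h2]]
          refine ⟨fun hN => (ih _).1 (PySem.Set.nodup_add _ _ hN), fun x => ?_⟩
          rw [(ih _).2 x, PySem.Set.mem_add]
          constructor
          · rintro ((hs | he) | ⟨c', hc', e, hv⟩)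
            · exact Or.inl hs
            · exact Or.inr ⟨c, List.mem_cons_self .., he, h2⟩
            · exact Or.inr ⟨c', List.mem_cons_of_mem _ hc', e, hv⟩
          · rintro (hs | ⟨c', hc', e, hv⟩)
            · exact Or.inl (Or.inl hs)
            · rcases List.mem_cons.mp hc' with h | h
              · subst h; exact Or.inl (Or.inr e)
              · exact Or.inr ⟨c', h, e, hv⟩
        · rw [show pvSStep matrix r s c = s by simp [pvSStep, h1, h2]]
          refine ⟨(ih s).1, fun x => ?_⟩
          rw [(ih s).2 x]
          constructor
          · rintro (hs | ⟨c', hc', e, hv⟩)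
            · exact Or.inl hs
            · exact Or.inr ⟨c', List.mem_cons_of_mem _ hc', e, hv⟩
          · rintro (hs | ⟨c', hc', e, hv⟩)
            · exact Or.inl hs
            · rcases List.mem_cons.mp hc' with h | h
              · subst h; omega
              · exact Or.inr ⟨c', h, e, hv⟩

lemma pvSFold_outer (matrix : List (List Int)) (cols : Nat) :
    ∀ (L : List Nat) (s : PySem.Set (Int × Int)),
      (s.Nodup → (L.foldl (fun s r => (List.range cols).foldl (pvSStep matrix r) s) s).Nodup) ∧
      ∀ x : Int × Int,
        x ∈ L.foldl (fun s r => (List.range cols).foldl (pvSStep matrix r) s) s ↔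
        x ∈ s ∨ ∃ i ∈ L, ∃ j ∈ List.range cols,
          x = ((i : Int), (j : Int)) ∧ pvGet2 matrix (i : Int) (j : Int) < 0 := by
  intro L
  induction L with
  | nil => intro s; simp
  | cons r L ih =>
      intro s
      simp only [List.foldl_cons]
      refine ⟨fun hN => (ih _).1 ((pvSFold_inner matrix r (List.range cols) s).1 hN),
        fun x => ?_⟩
      rw [(ih _).2 x, (pvSFold_inner matrix r (List.range cols) s).2 x]
      constructor
      · rintro ((hs | ⟨c, hc, e, hv⟩) | ⟨i, hi, j, hj, e, hv⟩)
        · exact Or.inl hs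
        · exact Or.inr ⟨r, List.mem_cons_self .., c, hc, e, hv⟩
        · exact Or.inr ⟨i, List.mem_cons_of_mem _ hi, j, hj, e, hv⟩
      · rintro (hs | ⟨i, hi, j, hj, e, hv⟩)
        · exact Or.inl (Or.inl hs)
        · rcases List.mem_cons.mp hi with h | h
          · subst h; exact Or.inl (Or.inr ⟨j, hj, e, hv⟩)
          · exact Or.inr ⟨i, h, j, hj, e, hv⟩

lemma pvQFold_inner (matrix : List (List Int)) (r : Nat) :
    ∀ (l : List Nat) (q : List (Int × Int)) (x : Int × Int),
      x ∈ l.foldl (pvQStep matrix r) q ↔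
        x ∈ q ∨ ∃ c ∈ l, x = ((r : Int), (c : Int)) ∧ 0 < pvGet2 matrix (r : Int) (c : Int) := by
  intro l
  induction l with
  | nil => intro q x; simp
  | cons c l ih =>
      intro q x
      simp only [List.foldl_cons]
      by_cases h1 : 0 < pvGet2 matrix (r : Int) (c : Int)
      · rw [show pvQStep matrix r q c = q ++ [((r : Int), (c : Int))] by simp [pvQStep, h1]]
        rw [ih]
        simp only [List.mem_append, List.mem_singleton, List.exists_mem_cons_iff]
        constructor
        · rintro ((h | h) | ⟨c', hc', e, hv⟩)
          · exact Or.inl h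
          · exact Or.inr (Or.inl ⟨h, h1⟩)
          · exact Or.inr (Or.inr ⟨c', hc', e, hv⟩)
        · rintro (h | (⟨h, -⟩ | ⟨c', hc', e, hv⟩))
          · exact Or.inl (Or.inl h)
          · exact Or.inl (Or.inr h)
          · exact Or.inr ⟨c', hc', e, hv⟩
      · rw [show pvQStep matrix r q c = q by simp [pvQStep, h1]]
        rw [ih]
        simp only [List.exists_mem_cons_iff]
        constructor
        · rintro (h | ⟨c', hc', e, hv⟩)
          · exact Or.inl h
          · exact Or.inr (Or.inr ⟨c', hc', e, hv⟩)
        · rintro (h | (⟨e, hv⟩ | ⟨c', hc', e, hv⟩))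
          · exact Or.inl h
          · exact absurd hv h1
          · exact Or.inr ⟨c', hc', e, hv⟩

lemma pvQFold_outer (matrix : List (List Int)) (cols : Nat) :
    ∀ (L : List Nat) (q : List (Int × Int)) (x : Int × Int),
      x ∈ L.foldl (fun q r => (List.range cols).foldl (pvQStep matrix r) q) q ↔
        x ∈ q ∨ ∃ i ∈ L, ∃ j ∈ List.range cols,
          x = ((i : Int), (j : Int)) ∧ 0 < pvGet2 matrix (i : Int) (j : Int) := by
  intro L
  induction L with
  | nil => intro q x; simp
  | cons r L ih =>
      intro q x
      simp only [List.foldl_cons]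
      rw [ih, pvQFold_inner]
      constructor
      · rintro ((h | ⟨c, hc, e, hv⟩) | ⟨i, hi, j, hj, e, hv⟩)
        · exact Or.inl h
        · exact Or.inr ⟨r, List.mem_cons_self .., c, hc, e, hv⟩
        · exact Or.inr ⟨i, List.mem_cons_of_mem _ hi, j, hj, e, hv⟩
      · rintro (h | ⟨i, hi, j, hj, e, hv⟩)
        · exact Or.inl (Or.inl h)
        · rcases List.mem_cons.mp hi with h' | h'
          · subst h'; exact Or.inl (Or.inr ⟨j, hj, e, hv⟩)
          · exact Or.inr ⟨i, h', j, hj, e, hv⟩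

lemma pvAInit_set_mem (matrix : List (List Int)) (rows cols : Nat) :
    (pvAInit matrix rows cols).2.Nodup ∧
      ∀ x : Int × Int, x ∈ (pvAInit matrix rows cols).2 ↔
        ∃ i ∈ List.range rows, ∃ j ∈ List.range cols,
          x = ((i : Int), (j : Int)) ∧ pvGet2 matrix (i : Int) (j : Int) < 0 := by
  rw [pvAInit_proj]
  have h := pvSFold_outer matrix cols (List.range rows) PySem.Set.empty
  refine ⟨h.1 (by simp [PySem.Set.empty]), fun x => ?_⟩
  rw [h.2 x]
  simp [PySem.Set.empty]

lemma pvAInit_queue_mem (matrix : List (List Int)) (rows cols : Nat) (x : Int × Int) :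
    x ∈ (pvAInit matrix rows cols).1 ↔
      ∃ i ∈ List.range rows, ∃ j ∈ List.range cols,
        x = ((i : Int), (j : Int)) ∧ 0 < pvGet2 matrix (i : Int) (j : Int) := by
  rw [pvAInit_proj]
  rw [pvQFold_outer]
  simp

lemma pvAInit_inv (matrix : List (List Int)) (rows cols : Nat) :
    pvInv (rows : Int) (cols : Int) (pvAInit matrix rows cols).2 matrix := by
  intro r c
  rw [(pvAInit_set_mem matrix rows cols).2]
  constructor
  · rintro ⟨i, hi, j, hj, hx, hv⟩
    rw [List.mem_range] at hi hj
    rw [Prod.mk.injEq] at hx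
    obtain ⟨e1, e2⟩ := hx
    subst e1; subst e2
    exact ⟨by positivity, by omega, by positivity, by omega, hv⟩
  · rintro ⟨h0, h1, h2, h3, hv⟩
    refine ⟨r.toNat, ?_, c.toNat, ?_, ?_, ?_⟩
    · rw [List.mem_range]; omega
    · rw [List.mem_range]; omega
    · have e1 : ((r.toNat : Nat) : Int) = r := by omega
      have e2 : ((c.toNat : Nat) : Int) = c := by omega
      rw [e1, e2]
    · have e1 : ((r.toNat : Nat) : Int) = r := by omega
      have e2 : ((c.toNat : Nat) : Int) = c := by omega
      rw [e1, e2]; exact hv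

-- under pvRel, one B sweep converts exactly the cells A's level converts
lemma pvConv_iff (rows cols : Nat) (Q : List (Int × Int)) (negs : PySem.Set (Int × Int))
    (g : List (List Int)) (hRel : pvRel rows cols Q negs g) (x : Int × Int) :
    x ∈ pvConvList rows cols g ↔ x ∈ negs ∧ ∃ q ∈ Q, pvAdj q x := by
  obtain ⟨hInv, hN, hQ, hIV⟩ := hRel
  constructor
  · intro hx
    obtain ⟨h0, h1, h2, h3, hneg⟩ := pvConvList_inbneg rows cols g hx
    have hxnegs : x ∈ negs := by
      have := (hInv x.1 x.2).mpr ⟨h0, h1, h2, h3, hneg⟩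
      simpa using this
    rcases (pvConvList_mem rows cols g x).mp hx with ⟨r, hr, c, hc, hx', -, hany⟩
    rw [List.any_eq_true] at hany
    obtain ⟨y, hy, hyb⟩ := hany
    rw [pvInb, decide_eq_true_iff] at hyb
    have hadj : pvAdj y x := by
      have : y ∈ pvBDirs x.1 x.2 := by rw [hx']; exact hy
      exact (mem_pvBDirs_iff x y).mp this
    exact ⟨hxnegs, hIV x hxnegs ⟨y, hyb, hadj⟩⟩
  · rintro ⟨hxnegs, q, hq, hadj⟩
    obtain ⟨h0, h1, h2, h3, hneg⟩ := (hInv x.1 x.2).mp (by simpa using hxnegs)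
    obtain ⟨q0, q1, q2, q3, qpos⟩ := hQ q hq
    rw [pvConvList_mem]
    refine ⟨x.1.toNat, by rw [List.mem_range]; omega, x.2.toNat, by rw [List.mem_range]; omega,
      ?_, ?_, ?_⟩
    · have e1 : ((x.1.toNat : Nat) : Int) = x.1 := by omega
      have e2 : ((x.2.toNat : Nat) : Int) = x.2 := by omega
      rw [e1, e2]
    · have e1 : ((x.1.toNat : Nat) : Int) = x.1 := by omega
      have e2 : ((x.2.toNat : Nat) : Int) = x.2 := by omega
      rw [e1, e2]; exact hneg
    · rw [List.any_eq_true]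
      refine ⟨q, ?_, ?_⟩
      · have e1 : ((x.1.toNat : Nat) : Int) = x.1 := by omega
        have e2 : ((x.2.toNat : Nat) : Int) = x.2 := by omega
        rw [e1, e2]
        exact (mem_pvBDirs_iff x q).mpr hadj
      · rw [pvInb, decide_eq_true_iff]
        exact ⟨q0, q1, q2, q3, qpos⟩

-- value of the grid after one sweep's flips
lemma pvFlip_get :
    ∀ (conv : List (Int × Int)) (g : List (List Int)), conv.Nodup →
      (∀ p ∈ conv, 0 ≤ p.1 ∧ 0 ≤ p.2 ∧ pvGet2 g p.1 p.2 < 0) →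
      ∀ x y : Int, 0 ≤ x → 0 ≤ y →
        pvGet2 (pvFlip g conv) x y =
          if (x, y) ∈ conv then -(pvGet2 g x y) else pvGet2 g x y := by
  intro conv
  induction conv with
  | nil => intro g _ _ x y _ _; simp [pvFlip]
  | cons p conv ih =>
      intro g hnd hmem x y hx hy
      rcases List.nodup_cons.mp hnd with ⟨hp, hnd'⟩
      obtain ⟨h0, h2, hv⟩ := hmem p (List.mem_cons_self ..)
      obtain ⟨hr, hc⟩ := pvGet2_lt_zero_bounds h0 h2 hv
      set g1 := pvSet2 g p.1 p.2 (-(pvGet2 g p.1 p.2)) with hg1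
      have hget1 : ∀ a b : Int, 0 ≤ a → 0 ≤ b →
          pvGet2 g1 a b = if a = p.1 ∧ b = p.2 then -(pvGet2 g p.1 p.2) else pvGet2 g a b := by
        intro a b ha hb
        rw [hg1, pvGet2_pvSet2 _ h0 h2 hr hc ha hb]
      have hmem' : ∀ q ∈ conv, 0 ≤ q.1 ∧ 0 ≤ q.2 ∧ pvGet2 g1 q.1 q.2 < 0 := by
        intro q hq
        obtain ⟨k0, k2, kv⟩ := hmem q (List.mem_cons_of_mem _ hq)
        have hne : ¬ (q.1 = p.1 ∧ q.2 = p.2) := by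
          intro he
          exact hp (by rw [← Prod.ext_iff.mpr he] at *; exact hq)
        rw [hget1 q.1 q.2 k0 k2, if_neg hne]
        exact ⟨k0, k2, kv⟩
      have hunf : pvFlip g (p :: conv) = pvFlip g1 conv := by simp [pvFlip, hg1]
      rw [hunf, ih g1 hnd' hmem' x y hx hy]
      by_cases hxy : (x, y) ∈ conv
      · have hne : ¬ (x = p.1 ∧ y = p.2) := by
          intro he
          refine hp ?_
          have : (x, y) = p := by
            rw [Prod.ext_iff]; exact he
          rw [← this]; exact hxy
        rw [if_pos hxy, if_pos (List.mem_cons_of_mem _ hxy), hget1 x y hx hy, if_neg hne]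
      · rw [if_neg hxy, hget1 x y hx hy]
        by_cases he : x = p.1 ∧ y = p.2
        · obtain ⟨e1, e2⟩ := he; subst e1; subst e2
          simp
        · rw [if_neg he, if_neg ?_]
          intro hm
          rcases List.mem_cons.mp hm with hm | hm
          · exact he (by rw [Prod.ext_iff] at hm; exact hm)
          · exact hxy hm

-- the central correspondence: from related states, A's BFS loop and B's sweep loop agree
lemma pvMain (rows cols : Nat) :
    ∀ (n : Nat) (negs : PySem.Set (Int × Int)) (Q : List (Int × Int))
      (gA gB : List (List Int)) (p : Int),
      negs.length = n → pvRel rows cols Q negs gB →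
      pvInv (rows : Int) (cols : Int) (pvALoop Q negs gA p).1 (pvBSweep rows cols gB p).1 ∧
      (pvALoop Q negs gA p).2 = (pvBSweep rows cols gB p).2 := by
  intro n
  induction n using Nat.strong_induction_on with
  | _ n IH =>
    intro negs Q gA gB p hn hRel
    obtain ⟨hInv, hN, hQpos, hIV⟩ := hRel
    have hconv_iff : ∀ x, x ∈ pvConvList rows cols gB ↔ x ∈ negs ∧ ∃ q ∈ Q, pvAdj q x :=
      pvConv_iff rows cols Q negs gB ⟨hInv, hN, hQpos, hIV⟩
    by_cases hbase : Q = [] ∨ negs = []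
    · have hconv : pvConvList rows cols gB = [] := by
        rw [List.eq_nil_iff_forall_not_mem]
        intro x hx
        rcases (hconv_iff x).mp hx with ⟨hxn, q, hq, -⟩
        rcases hbase with h | h
        · rw [h] at hq; simp at hq
        · rw [h] at hxn; simp at hxn
      rw [pvALoop, if_pos hbase, pvBSweep, dif_pos hconv]
      exact ⟨hInv, rfl⟩
    · obtain ⟨c1, c2, c3, c4, c5⟩ := pvLevelChar Q negs gA [] hN (by simp) (by simp)
      have hlevel : pvALevel Q negs gA =
          Q.foldl (fun st cell => pvDirs.foldl (pvAStepDir cell.1 cell.2) st) (negs, gA, []) := rfl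
      rw [← hlevel] at c1 c2 c3 c4 c5
      have hc2' : ∀ x, x ∈ (pvALevel Q negs gA).2.2 ↔ x ∈ negs ∧ ∃ q ∈ Q, pvAdj q x := by
        intro x
        rw [c2 x]
        simp
      by_cases hstop : (pvALevel Q negs gA).2.2 = []
      · have hconv : pvConvList rows cols gB = [] := by
          rw [List.eq_nil_iff_forall_not_mem]
          intro x hx
          have : x ∈ (pvALevel Q negs gA).2.2 := (hc2' x).mpr ((hconv_iff x).mp hx)
          rw [hstop] at this
          simp at this
        rw [pvALoop, if_neg hbase]
        simp only [hstop, if_true]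
        rw [pvBSweep, dif_pos hconv]
        refine ⟨?_, rfl⟩
        intro r c
        rw [c1 (r, c)]
        have hnoadj : ∀ x, ¬ (x ∈ negs ∧ ∃ q ∈ Q, pvAdj q x) := by
          intro x hx
          have : x ∈ (pvALevel Q negs gA).2.2 := (hc2' x).mpr hx
          rw [hstop] at this
          simp at this
        constructor
        · rintro ⟨h1, -⟩
          exact (hInv r c).mp h1
        · intro h
          have h1 : (r, c) ∈ negs := (hInv r c).mpr h
          refine ⟨h1, fun q hq hadj => hnoadj (r, c) ⟨h1, q, hq, hadj⟩⟩
      · -- a nonempty level: both sides recurse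
        have hconvne : pvConvList rows cols gB ≠ [] := by
          obtain ⟨x, hx⟩ := List.exists_mem_of_ne_nil _ hstop
          have : x ∈ pvConvList rows cols gB := (hconv_iff x).mpr ((hc2' x).mp hx)
          exact List.ne_nil_of_mem this
        rw [pvALoop, if_neg hbase]
        simp only [hstop, if_false]
        rw [pvBSweep, dif_neg hconvne]
        set conv := pvConvList rows cols gB with hconvdef
        set st := pvALevel Q negs gA with hst
        set gB' := pvFlip gB conv with hgB'
        -- facts used to evaluate the flipped grid
        have hcmem : ∀ q ∈ conv, 0 ≤ q.1 ∧ 0 ≤ q.2 ∧ pvGet2 gB q.1 q.2 < 0 := by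
          intro q hq
          obtain ⟨k0, k1, k2, k3, kv⟩ := pvConvList_inbneg rows cols gB hq
          exact ⟨k0, k2, kv⟩
        have hget' : ∀ x y : Int, 0 ≤ x → 0 ≤ y →
            pvGet2 gB' x y = if (x, y) ∈ conv then -(pvGet2 gB x y) else pvGet2 gB x y :=
          pvFlip_get conv gB (pvConvList_nodup rows cols gB) hcmem
        -- the new states are related
        have hRel' : pvRel rows cols st.2.2 st.1 gB' := by
          refine ⟨?_, c3, ?_, ?_⟩
          · intro r c
            rw [c1 (r, c)]
            constructor
            · rintro ⟨h1, h2⟩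
              obtain ⟨k0, k1, k2, k3, kv⟩ := (hInv r c).mp h1
              have hnc : (r, c) ∉ conv := by
                intro hc
                rcases (hconv_iff (r, c)).mp hc with ⟨-, q, hq, hadj⟩
                exact h2 q hq hadj
              refine ⟨k0, k1, k2, k3, ?_⟩
              rw [hget' r c k0 k2, if_neg hnc]
              exact kv
            · rintro ⟨k0, k1, k2, k3, kv⟩
              rw [hget' r c k0 k2] at kv
              by_cases hc : (r, c) ∈ conv
              · obtain ⟨m0, m2, mv⟩ := hcmem (r, c) hc
                rw [if_pos hc] at kv
                have mv' : pvGet2 gB r c < 0 := mv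
                omega
              · rw [if_neg hc] at kv
                have h1 : (r, c) ∈ negs := (hInv r c).mpr ⟨k0, k1, k2, k3, kv⟩
                refine ⟨h1, fun q hq hadj => hc ((hconv_iff (r, c)).mpr ⟨h1, q, hq, hadj⟩)⟩
          · intro q hq
            have hqc : q ∈ conv := (hconv_iff q).mpr ((hc2' q).mp hq)
            obtain ⟨k0, k1, k2, k3, kv⟩ := pvConvList_inbneg rows cols gB hqc
            refine ⟨k0, k1, k2, k3, ?_⟩
            rw [hget' q.1 q.2 k0 k2]
            have : (q.1, q.2) ∈ conv := by simpa using hqc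
            rw [if_pos this]
            omega
          · rintro x hx ⟨y, ⟨y0, y1, y2, y3, ypos⟩, hadj⟩
            rw [hget' y.1 y.2 y0 y2] at ypos
            by_cases hyc : (y.1, y.2) ∈ conv
            · refine ⟨y, ?_, hadj⟩
              rw [hc2' y]
              exact (hconv_iff y).mp (by simpa using hyc)
            · rw [if_neg hyc] at ypos
              have hxn : x ∈ negs := ((c1 x).mp hx).1
              have := hIV x hxn ⟨y, ⟨y0, y1, y2, y3, ypos⟩, hadj⟩
              obtain ⟨q, hq, hqadj⟩ := this
              have : x ∈ st.2.2 := (hc2' x).mpr ⟨hxn, q, hq, hqadj⟩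
              exact absurd hx (by intro h; exact c5 x this h)
        have hlt : st.1.length < n := by
          rw [← hn]
          exact pvALoop_dec Q negs gA hstop
        exact IH st.1.length hlt st.1 st.2.2 st.2.1 gB' (p + 1) rfl hRel'

-- ===== VERDICT (by name: the statement is the Claim_ definition above) =====
theorem minimum_passes_with_copy_spec : Claim_equal_minimum_passes_with_copy := by
  unfold Claim_equal_minimum_passes_with_copy
  intro matrix _ _
  unfold Spec_minimum_passes_with_copy
  unfold minimum_passes_with_copy minimum_passes_with_copy_alt
  by_cases hbase : matrix = [] ∨ matrix.headD [] = []
  · simp only [hbase, if_pos]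
  · simp only [hbase, if_neg, if_false]
    set rows := matrix.length with hrows
    set cols := (matrix.headD []).length with hcols
    have hInv0 : pvInv (rows : Int) (cols : Int) (pvAInit matrix rows cols).2 matrix :=
      pvAInit_inv matrix rows cols
    have hN0 : (pvAInit matrix rows cols).2.Nodup := (pvAInit_set_mem matrix rows cols).1
    have hQ0 : ∀ q ∈ (pvAInit matrix rows cols).1,
        0 ≤ q.1 ∧ q.1 < (rows : Int) ∧ 0 ≤ q.2 ∧ q.2 < (cols : Int) ∧ 0 < pvGet2 matrix q.1 q.2 := by
      intro q hq
      rcases (pvAInit_queue_mem matrix rows cols q).mp hq with ⟨i, hi, j, hj, e, hv⟩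
      rw [List.mem_range] at hi hj
      subst e
      exact ⟨by positivity, by omega, by positivity, by omega, hv⟩
    have hIV0 : ∀ x ∈ (pvAInit matrix rows cols).2,
        (∃ y : Int × Int, (0 ≤ y.1 ∧ y.1 < (rows : Int) ∧ 0 ≤ y.2 ∧ y.2 < (cols : Int) ∧
          0 < pvGet2 matrix y.1 y.2) ∧ pvAdj y x) → ∃ q ∈ (pvAInit matrix rows cols).1, pvAdj q x := by
      rintro x hx ⟨y, ⟨y0, y1, y2, y3, ypos⟩, hadj⟩
      refine ⟨y, ?_, hadj⟩
      rw [pvAInit_queue_mem]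
      refine ⟨y.1.toNat, by rw [List.mem_range]; omega, y.2.toNat, by rw [List.mem_range]; omega,
        ?_, ?_⟩
      · have e1 : ((y.1.toNat : Nat) : Int) = y.1 := by omega
        have e2 : ((y.2.toNat : Nat) : Int) = y.2 := by omega
        rw [e1, e2]
      · have e1 : ((y.1.toNat : Nat) : Int) = y.1 := by omega
        have e2 : ((y.2.toNat : Nat) : Int) = y.2 := by omega
        rw [e1, e2]; exact ypos
    have hRel0 : pvRel rows cols (pvAInit matrix rows cols).1 (pvAInit matrix rows cols).2 matrix :=
      ⟨hInv0, hN0, hQ0, hIV0⟩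
    obtain ⟨hinvF, heqF⟩ := pvMain rows cols ((pvAInit matrix rows cols).2.length)
      (pvAInit matrix rows cols).2 (pvAInit matrix rows cols).1 matrix matrix 0 rfl hRel0
    set aF := pvALoop (pvAInit matrix rows cols).1 (pvAInit matrix rows cols).2 matrix 0 with haF
    set bF := pvBSweep rows cols matrix 0 with hbF
    have hscan := pvScan_iff rows cols aF.1 bF.1 hinvF
    by_cases hempty : (pvAInit matrix rows cols).2 = []
    · -- A returns 0 immediately; its loop would also return (negs, 0)
      have haF0 : aF = ((pvAInit matrix rows cols).2, 0) := by
        rw [haF, pvALoop, if_pos (Or.inr hempty)]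
      have hscanF : ¬ (((List.range rows).any (fun r =>
          (List.range cols).any (fun c => decide (pvGet2 bF.1 (r : Int) (c : Int) < 0)))) = true) := by
        rw [hscan, haF0]
        simp [hempty]
      simp only [hempty, if_pos, hscanF, if_false]
      rw [← heqF, haF0]
      simp
    · by_cases hend : aF.1 = []
      · have hscanF : ¬ (((List.range rows).any (fun r =>
            (List.range cols).any (fun c => decide (pvGet2 bF.1 (r : Int) (c : Int) < 0)))) = true) := by
          rw [hscan]; simpa using hend
        simp [hempty, hend, hscanF, heqF]
      · have hscanF : (((List.range rows).any (fun r =>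
            (List.range cols).any (fun c => decide (pvGet2 bF.1 (r : Int) (c : Int) < 0)))) = true) := by
          rw [hscan]; exact hend
        simp [hempty, hend, hscanF]
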